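-- pv_equiv track=rewrite | github.com/pypi-data/pypi-mirror-398 | packages/azpytools/azpytools-1.1.12.tar.gz/azpytools-1.1.12/azpytools/utils.py | getPLZH
-- ===== SOURCE A (Python) =====
-- import itertools
--
-- def getPLZH(inList:list,resultNum = 1,calType = 'C' ):
--     sourceData = [i for i in inList]
--     retNum = resultNum
--     if len(sourceData) == 0 or resultNum == 0:
--         return None
--     if len(sourceData) < resultNum:
--         retNum = len(sourceData)
--     resultLists=[]
--     counter = 0
--     if calType == 'P':
--     # 排列
--         for p in itertools.permutations(sourceData,retNum):
--             if not p is None: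
--                 resultLists.append(p)
--     else:
--     # 组合
--         for c in itertools.combinations(sourceData,retNum): #打乱不重复组合
--             if not c is None:
--                 resultLists.append(c)
--     return resultLists
-- ===== SOURCE B (Python) =====
-- def getPLZH(inList: list, resultNum=1, calType='C'):
--     n = len(inList)
--     if n == 0 or resultNum == 0:
--         return None
--     r = n if n < resultNum else resultNum
--     out = []
--     if calType == 'P':
--         def perm(prefix, remaining):
--             if len(prefix) == r:
--                 out.append(tuple(prefix))
--                 return
--             for i in remaining:
--                 perm(prefix + [inList[i]], [j for j in remaining if j != i])
--         perm([], list(range(n)))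
--     else:
--         def comb(prefix, start):
--             if len(prefix) == r:
--                 out.append(tuple(prefix))
--                 return
--             for i in range(start, n):
--                 comb(prefix + [inList[i]], i + 1)
--         comb([], 0)
--     return out
-- ===== Notes on version B (the rewrite author's own statement) =====
-- stated objective: alternative
-- what changed: Replaces the itertools.permutations/combinations loops by hand-written recursive backtracking over indices (combinations recurse with an increasing start index, permutations with a list of still-unused indices), emitting tuples in the same lexicographic-by-index order.
import Mathlib
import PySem

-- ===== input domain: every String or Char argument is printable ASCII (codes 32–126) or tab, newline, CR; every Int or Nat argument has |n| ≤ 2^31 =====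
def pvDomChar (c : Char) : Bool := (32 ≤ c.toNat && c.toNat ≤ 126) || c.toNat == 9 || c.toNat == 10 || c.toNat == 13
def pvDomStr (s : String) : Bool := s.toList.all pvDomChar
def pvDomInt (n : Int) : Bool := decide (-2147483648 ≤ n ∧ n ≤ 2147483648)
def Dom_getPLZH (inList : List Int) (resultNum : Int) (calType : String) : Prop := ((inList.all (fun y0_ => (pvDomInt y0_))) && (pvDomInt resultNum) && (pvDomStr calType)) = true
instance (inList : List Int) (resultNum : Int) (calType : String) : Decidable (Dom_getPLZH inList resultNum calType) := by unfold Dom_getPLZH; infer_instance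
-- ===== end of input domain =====

-- B replaces the itertools.permutations/combinations loops by hand-written recursive
-- backtracking over indices (same return value; objective: alternative, not faster).

-- ===== PORT A =====
-- 'itertools.permutations' / 'itertools.combinations' are the PySem primitives
-- PySem.List.permutations / PySem.List.combinations; the 'for … append' loops are foldl.
def getPLZH (inList : List Int) (resultNum : Int) (calType : String) : Option (List (List Int)) :=
  let sourceData := inList.map (fun i => i)
  if sourceData.length = 0 ∨ resultNum = 0 then none
  else
    -- retNum ≥ 0 under Pre_ (itertools raises ValueError for a negative retNum, excluded there),
    -- so Int.toNat is exact here.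
    let retNum : Int := if (sourceData.length : Int) < resultNum then (sourceData.length : Int) else resultNum
    if calType = "P" then
      some ((PySem.List.permutations sourceData retNum.toNat).foldl (fun acc p => acc ++ [p]) [])
    else
      some ((PySem.List.combinations sourceData retNum.toNat).foldl (fun acc c => acc ++ [c]) [])

-- ===== PORT B =====
-- 'for i in range(start, n): comb(prefix + [inList[i]], i + 1)' — loop over the still-available
-- index range, recursing with the next start index; '.attach' only carries the membership fact
-- needed for termination.
def combGo (src : List Int) (r : Int) (pfx : List Int) (start : Nat) : List (List Int) :=
  if (pfx.length : Int) = r then [pfx]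
  else (List.range' start (src.length - start)).attach.flatMap
    (fun i => combGo src r (pfx ++ [src.getD i.1 0]) (i.1 + 1))
termination_by src.length - start
decreasing_by
  have h := List.mem_range'_1.mp i.2
  omega

-- 'for i in remaining: perm(prefix + [inList[i]], [j for j in remaining if j != i])'
def permGo (src : List Int) (r : Int) (pfx : List Int) (rem : List Nat) : List (List Int) :=
  if (pfx.length : Int) = r then [pfx]
  else rem.attach.flatMap
    (fun i => permGo src r (pfx ++ [src.getD i.1 0]) (rem.filter (fun j => j ≠ i.1)))
termination_by rem.length
decreasing_by
  have h : (List.filter (fun x : {x // x ∈ rem} => !decide ((x : Nat) = i.1)) rem.attach).length < rem.attach.length := by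
    refine List.length_filter_lt_length_iff_exists.mpr ⟨i, List.mem_attach _ _, ?_⟩
    simp
  simpa using h

def getPLZH_alt (inList : List Int) (resultNum : Int) (calType : String) : Option (List (List Int)) :=
  if inList.length = 0 ∨ resultNum = 0 then none
  else
    let r : Int := if (inList.length : Int) < resultNum then (inList.length : Int) else resultNum
    if calType = "P" then some (permGo inList r [] (List.range inList.length))
    else some (combGo inList r [] 0)

-- ===== PRECONDITION & SPEC =====
-- Pre_ excludes only the inputs where A raises: a nonempty list with a negative resultNum makes
-- itertools raise ValueError ('r must be non-negative').
def Pre_getPLZH (inList : List Int) (resultNum : Int) (calType : String) : Prop :=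
  inList = [] ∨ 0 ≤ resultNum
instance (inList : List Int) (resultNum : Int) (calType : String) : Decidable (Pre_getPLZH inList resultNum calType) := by unfold Pre_getPLZH; infer_instance
def pvWitness_getPLZH : List Int × Int × String := ([1, 2, 3], 2, "C")

def Spec_getPLZH (inList : List Int) (resultNum : Int) (calType : String) (out : Option (List (List Int))) : Prop := out = getPLZH_alt inList resultNum calType
instance (inList : List Int) (resultNum : Int) (calType : String) (out : Option (List (List Int))) : Decidable (Spec_getPLZH inList resultNum calType out) := by unfold Spec_getPLZH; infer_instance

-- ===== CLAIM (what is proved, stated in full; the proofs are below) =====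
def Claim_equal_getPLZH : Prop := ∀ (inList : List Int) (resultNum : Int) (calType : String), Dom_getPLZH inList resultNum calType → Pre_getPLZH inList resultNum calType → Spec_getPLZH inList resultNum calType (getPLZH inList resultNum calType)
-- ===== LEMMAS AND PROOFS =====

-- unattach a flatMap whose body ignores the membership proof
theorem flatMap_attach_eq {α β : Type} (l : List α) (f : α → List β) :
    l.attach.flatMap (fun i => f i.1) = l.flatMap f := by
  conv_rhs => rw [← List.attach_map_subtype_val l]
  rw [List.flatMap_map]

-- a flatMap over a list of indices, rewritten as a flatMap over positions
theorem flatMap_eq_range {β : Type} (l : List Nat) (h : Nat → List β) :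
    l.flatMap h = (List.range l.length).flatMap (fun j => h (l.getD j 0)) := by
  induction l with
  | nil => simp
  | cons x t ih =>
    simp [List.range_succ_eq_map, List.flatMap_cons, List.flatMap_map, ih]

theorem getD_mem_of_lt (l : List Nat) (j : Nat) (hj : j < l.length) : l.getD j 0 ∈ l := by
  rw [List.getD_eq_getElem?_getD, List.getElem?_eq_getElem hj]
  exact List.getElem_mem hj

-- on a duplicate-free index list, dropping one value positionally is eraseIdx
theorem filter_ne_getD_eq_eraseIdx (l : List Nat) (hnd : l.Nodup) (j : Nat) (hj : j < l.length) :
    l.filter (fun x => x ≠ l.getD j 0) = l.eraseIdx j := by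
  induction l generalizing j with
  | nil => simp at hj
  | cons x t ih =>
    obtain ⟨hx, hnd'⟩ := List.nodup_cons.mp hnd
    cases j with
    | zero =>
      simp only [List.getD_cons_zero, List.eraseIdx_zero, List.tail_cons, List.filter_cons]
      have h1 : (t.filter (fun y => decide (y ≠ x))) = t := by
        apply List.filter_eq_self.mpr
        intro a ha
        simp only [ne_eq, decide_eq_true_eq]
        exact fun h => hx (h ▸ ha)
      simp only [ne_eq, decide_not] at h1 ⊢
      simp [h1]
    | succ j =>
      have hmem : t.getD j 0 ∈ t := getD_mem_of_lt t j (by simpa using hj)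
      have hxne : x ≠ t.getD j 0 := fun h => hx (h ▸ hmem)
      simp only [List.getD_cons_succ, List.eraseIdx_cons_succ, List.filter_cons]
      rw [ih hnd' j (by simpa using hj)]
      have hd : (decide (x ≠ t.getD j 0)) = true := by simpa using hxne
      simp only [List.getD_eq_getElem?_getD] at hd
      simp [hd]

theorem map_getD_range (src : List Int) :
    (List.range src.length).map (fun i => src.getD i 0) = src := by
  apply List.ext_getElem
  · simp
  · intro i h1 h2
    simp [List.getD_eq_getElem?_getD, List.getElem?_eq_getElem h2]

-- positional characterisation of PySem.List.combinations at a positive count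
theorem combinations_succ_char (tail : List Int) (k : Nat) :
    PySem.List.combinations tail (k + 1)
      = (List.range tail.length).flatMap
          (fun j => (PySem.List.combinations (tail.drop (j + 1)) k).map (tail.getD j 0 :: ·)) := by
  induction tail with
  | nil => simp [PySem.List.combinations_nil_succ]
  | cons x t ih =>
    rw [PySem.List.combinations_cons_succ, ih]
    simp [List.range_succ_eq_map, List.flatMap_cons, List.flatMap_map]

-- B's combination backtracking, characterised by A's primitive
theorem combGo_eq (src : List Int) (k : Nat) (pfx : List Int) (start : Nat) :
    combGo src ((pfx.length + k : Nat) : Int) pfx start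
      = (PySem.List.combinations (src.drop start) k).map (pfx ++ ·) := by
  induction k generalizing pfx start with
  | zero =>
    rw [combGo]
    simp [PySem.List.combinations_zero]
  | succ k ih =>
    rw [combGo, if_neg (by push_cast; omega)]
    rw [flatMap_attach_eq _ (fun n => combGo src ((pfx.length + (k + 1) : Nat) : Int) (pfx ++ [src.getD n 0]) (n + 1))]
    rw [List.range'_eq_map_range, List.flatMap_map]
    rw [combinations_succ_char, List.map_flatMap, List.length_drop]
    refine List.flatMap_congr ?_
    intro j hj
    have hj' : j < src.length - start := List.mem_range.mp hj
    have hv : src.getD (start + j) 0 = (src.drop start).getD j 0 := by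
      simp [List.getD_eq_getElem?_getD, List.getElem?_drop]
    have hr : ((pfx.length + (k + 1) : Nat) : Int) = (((pfx ++ [src.getD (start + j) 0]).length + k : Nat) : Int) := by
      push_cast; simp; omega
    rw [hr, ih]
    have hdrop : src.drop (start + j + 1) = (src.drop start).drop (j + 1) := by
      rw [List.drop_drop]; ring_nf
    rw [hdrop, hv]
    simp [List.map_map, Function.comp]

-- B's permutation backtracking, characterised by A's primitive
theorem permGo_eq (src : List Int) (k : Nat) (pfx : List Int) (rem : List Nat) (hnd : rem.Nodup) :
    permGo src ((pfx.length + k : Nat) : Int) pfx rem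
      = (PySem.List.permutations (rem.map (fun i => src.getD i 0)) k).map (pfx ++ ·) := by
  induction k generalizing pfx rem with
  | zero =>
    rw [permGo]
    simp [PySem.List.permutations_zero]
  | succ k ih =>
    rw [permGo, if_neg (by push_cast; omega)]
    rw [flatMap_attach_eq _ (fun n => permGo src ((pfx.length + (k + 1) : Nat) : Int) (pfx ++ [src.getD n 0]) (rem.filter (fun j => j ≠ n)))]
    rw [flatMap_eq_range]
    rw [PySem.List.permutations_succ, List.map_flatMap, List.length_map]
    refine List.flatMap_congr ?_
    intro j hj
    have hj' : j < rem.length := List.mem_range.mp hj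
    rw [filter_ne_getD_eq_eraseIdx rem hnd j hj']
    have hr : ((pfx.length + (k + 1) : Nat) : Int) = (((pfx ++ [src.getD (rem.getD j 0) 0]).length + k : Nat) : Int) := by
      push_cast; simp; omega
    rw [hr, ih _ _ (List.Nodup.eraseIdx j hnd)]
    have hget : (rem.map (fun i => src.getD i 0))[j]? = some (src.getD (rem.getD j 0) 0) := by
      rw [List.getElem?_eq_getElem (by simpa using hj')]
      simp [List.getD_eq_getElem?_getD, List.getElem?_eq_getElem hj']
    rw [hget]
    rw [← List.eraseIdx_map]
    simp [List.map_map, Function.comp]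

-- ===== VERDICT (by name: the statement is the Claim_ definition above) =====
theorem getPLZH_spec : Claim_equal_getPLZH := by
  intro inList resultNum calType _ hpre
  unfold Spec_getPLZH getPLZH getPLZH_alt
  have hmap : inList.map (fun i => i) = inList := List.map_id' inList
  simp only [hmap]
  by_cases h0 : inList.length = 0 ∨ resultNum = 0
  · rw [if_pos h0, if_pos h0]
  · rw [if_neg h0, if_neg h0]
    have hres : 0 ≤ resultNum := by
      rcases hpre with h | h
      · exact absurd (by simp [h]) h0
      · exact h
    set rN : Int := if (inList.length : Int) < resultNum then (inList.length : Int) else resultNum with hrN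
    have h0le : 0 ≤ rN := by
      rw [hrN]; split_ifs
      · exact Int.natCast_nonneg _
      · exact hres
    have hk : rN = ((([] : List Int).length + rN.toNat : Nat) : Int) := by
      simp [Int.toNat_of_nonneg h0le]
    by_cases hP : calType = "P"
    · rw [if_pos hP, if_pos hP]
      congr 1
      rw [PySem.List.foldl_append_singleton_eq_self]
      conv_rhs => rw [hk, permGo_eq inList rN.toNat [] (List.range inList.length) (List.nodup_range)]
      rw [map_getD_range]
      simp
    · rw [if_neg hP, if_neg hP]
      congr 1
      rw [PySem.List.foldl_append_singleton_eq_self]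
      conv_rhs => rw [hk, combGo_eq inList rN.toNat [] 0]
      simp
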